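-- pv_equiv track=rewrite | github.com/alicemb00/VHacks2020 | rm.py | get_rm_code
-- ===== SOURCE A (Python) =====
-- def split_num(num_str):     # make life easier when entering words
--     return [int(i) for i in num_str]
--
-- def join_num(split_num):
--     num_str = ""
--     for i in split_num:
--         num_str += str(i)
--     return num_str
--
-- def add_words(w1, w2):
--     new_word = []
--     for (idx, val) in enumerate(w1):
--         new_word += [(int(val) + int(w2[idx])) % 2]
--     return new_word
--
-- def zero_case(m):
--     return {join_num([0 for _ in range(2**m)]), join_num([1 for _ in range(2**m)])}
--
-- def force_length(bin_str, m):
--     if(len(str(bin_str)[2:]) < m):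
--         return join_num([0 for _ in range(m - len(str(bin_str)[2:]))]) + str(bin_str)[2:]
--     return str(bin_str)[2:]
--
-- def equal_case(m):
--     code = set()
--     for i in range(2**(2**m)):
--         code.add(force_length(bin(i), 2**m))
--     return code
--
-- def get_rm_code(r, m):
--     if r == m:
--         return equal_case(m)
--     elif r == 0:
--         return zero_case(m)
--     else:
--         code = set()
--         set_1 = get_rm_code(r, m-1)
--         set_2 = get_rm_code(r-1, m-1)
--         for i in set_1:
--             for j in set_2:
--                 code.add(i + join_num(add_words(split_num(i), split_num(j))))
--         return code
-- ===== SOURCE B (Python) =====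
-- def get_rm_code(r, m):
--     # Bottom-up dynamic programming over the Plotkin (u | u+v) construction:
--     # row[rr] holds RM(rr, mm) after processing level mm; each subcode is
--     # computed exactly once instead of exponentially often by the recursion.
--     def xor(a, b):
--         return ''.join('1' if x != y else '0' for x, y in zip(a, b))
--
--     def combine(s1, s2):
--         return {a + xor(a, b) for a in s1 for b in s2}
--
--     def full(mm):
--         n = 2 ** mm
--         return {format(i, 'b').zfill(n) for i in range(2 ** n)}
--
--     row = [full(0)]
--     for mm in range(1, m + 1):
--         half = 2 ** mm
--         new = [{'0' * half, '1' * half}]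
--         for rr in range(1, min(r, mm) + 1):
--             new.append(full(mm) if rr == mm else combine(row[rr], row[rr - 1]))
--         row = new
--     return row[r]
-- ===== Notes on version B (the rewrite author's own statement) =====
-- stated objective: alternative
-- what changed: Replaces A's top-down recursion (which recomputes each RM(r',m') subcode many times) by a bottom-up dynamic-programming table over the Plotkin (u | u+v) construction, computing each subcode exactly once, with the codeword XOR done directly on strings via zip/join instead of A's split-to-ints/add/mod/join round trip.
import Mathlib
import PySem

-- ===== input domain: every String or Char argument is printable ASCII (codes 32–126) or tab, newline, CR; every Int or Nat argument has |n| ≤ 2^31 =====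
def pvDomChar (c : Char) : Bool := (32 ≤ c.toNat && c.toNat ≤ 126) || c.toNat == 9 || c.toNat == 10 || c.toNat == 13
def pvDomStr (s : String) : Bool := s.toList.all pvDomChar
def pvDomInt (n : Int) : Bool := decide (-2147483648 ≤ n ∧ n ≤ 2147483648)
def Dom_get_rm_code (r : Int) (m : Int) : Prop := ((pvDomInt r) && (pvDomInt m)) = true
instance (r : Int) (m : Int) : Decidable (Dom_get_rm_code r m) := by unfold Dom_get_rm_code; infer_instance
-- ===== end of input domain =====

-- B replaces A's self-recomputing recursion by a bottom-up DP over the Plotkin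
-- construction (each subcode computed once); codewords are handled as List Char and
-- wrapped with String.ofList at the very end (string reasoning is on the list side).

-- ===== PORT A =====
-- split_num: int(ch) for each character; exact on the reachable inputs (codeword
-- characters are always the digits '0'/'1'; elsewhere Python raises ValueError).
def pvSplitNum (s : List Char) : List Int :=
  s.map (fun c => (PySem.Int.ofChars? [c]).getD 0)

def pvJoinNum (xs : List Int) : List Char :=
  xs.foldl (fun acc i => acc ++ PySem.Int.toChars i) []

-- add_words: w2[idx] is in range on every reachable input (equal-length codewords);
-- pyGetD's default is never used there.
def pvAddWords (w1 w2 : List Int) : List Int :=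
  (PySem.List.enumerate w1).foldl
    (fun nw p => nw ++ [PySem.Int.mod (p.2 + PySem.List.pyGetD w2 p.1 0) 2]) []

-- 2**m is ported as (2:Int)^m.toNat: exact for 0 ≤ m (for m < 0 Python's 2**m is a
-- float and range() raises TypeError; those inputs are outside Pre_).
def pvZeroCase (m : Int) : PySem.Set (List Char) :=
  PySem.Set.ofList
    [pvJoinNum ((PySem.List.pyRange 0 ((2:Int) ^ m.toNat)).map (fun _ => 0)),
     pvJoinNum ((PySem.List.pyRange 0 ((2:Int) ^ m.toNat)).map (fun _ => 1))]

def pvForceLength (binStr : List Char) (m : Int) : List Char :=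
  if ((PySem.List.slice binStr (some 2) none).length : Int) < m then
    pvJoinNum ((PySem.List.pyRange 0 (m - (PySem.List.slice binStr (some 2) none).length)).map (fun _ => 0))
      ++ PySem.List.slice binStr (some 2) none
  else PySem.List.slice binStr (some 2) none

def pvEqualCase (m : Int) : PySem.Set (List Char) :=
  (PySem.List.pyRange 0 ((2:Int) ^ (((2:Int) ^ m.toNat).toNat))).foldl
    (fun code i => PySem.Set.add code (pvForceLength (PySem.Int.toBinChars0b i) ((2:Int) ^ m.toNat)))
    []

def get_rm_codeChars (r : Int) (m : Int) : PySem.Set (List Char) :=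
  if r = m then pvEqualCase m
  else if r = 0 then pvZeroCase m
  else if m ≤ 0 then []  -- totality guard: here Python's recursion never returns
  else
    let set_1 := get_rm_codeChars r (m-1)
    let set_2 := get_rm_codeChars (r-1) (m-1)
    set_1.foldl (fun code i =>
      set_2.foldl (fun code j =>
        PySem.Set.add code (i ++ pvJoinNum (pvAddWords (pvSplitNum i) (pvSplitNum j)))) code) []
termination_by m.toNat
decreasing_by all_goals omega

def get_rm_code (r : Int) (m : Int) : List String :=
  (get_rm_codeChars r m).map String.ofList

-- ===== PORT B =====
def pvXor (a b : List Char) : List Char :=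
  (a.zip b).map (fun p => if p.1 ≠ p.2 then '1' else '0')

def pvCombine (s1 s2 : PySem.Set (List Char)) : PySem.Set (List Char) :=
  PySem.Set.ofList (s1.flatMap (fun a => s2.map (fun b => a ++ pvXor a b)))

def pvFull (mm : Int) : PySem.Set (List Char) :=
  PySem.Set.ofList
    ((PySem.List.pyRange 0 ((2:Int) ^ (((2:Int) ^ mm.toNat).toNat))).map
      (fun i => PySem.Chars.zfill (PySem.Int.toBinChars i) ((2:Int) ^ mm.toNat)))

-- {'0' * half, '1' * half}
def pvZeroLit (mm : Int) : PySem.Set (List Char) :=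
  PySem.Set.ofList
    [List.replicate ((2:Int) ^ mm.toNat).toNat '0', List.replicate ((2:Int) ^ mm.toNat).toNat '1']

def pvStep (r : Int) (row : List (PySem.Set (List Char))) (mm : Int) : List (PySem.Set (List Char)) :=
  (PySem.List.pyRange 1 (min r mm + 1)).foldl
    (fun new rr =>
      new ++ [if rr = mm then pvFull mm
              else pvCombine (PySem.List.pyGetD row rr []) (PySem.List.pyGetD row (rr-1) [])])
    [pvZeroLit mm]

def get_rm_code_alt (r : Int) (m : Int) : List String :=
  let row := (PySem.List.pyRange 1 (m+1)).foldl (pvStep r) [pvFull 0]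
  (PySem.List.pyGetD row r []).map String.ofList

-- ===== PRECONDITION & SPEC =====
-- Pre_ excludes exactly the inputs on which A never returns normally: outside
-- 0 ≤ r ≤ m the recursion descends forever (RecursionError), or a base case hits
-- range(2**m) with negative m, a float (TypeError).
def Pre_get_rm_code (r : Int) (m : Int) : Prop := 0 ≤ r ∧ r ≤ m
instance (r : Int) (m : Int) : Decidable (Pre_get_rm_code r m) := by unfold Pre_get_rm_code; infer_instance
def pvWitness_get_rm_code : Int × Int := (1, 2)

def Spec_get_rm_code (r : Int) (m : Int) (out : List String) : Prop := out = get_rm_code_alt r m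
instance (r : Int) (m : Int) (out : List String) : Decidable (Spec_get_rm_code r m out) := by unfold Spec_get_rm_code; infer_instance

-- ===== CLAIM (what is proved, stated in full; the proofs are below) =====
def Claim_equal_get_rm_code : Prop := ∀ (r : Int) (m : Int), Dom_get_rm_code r m → Pre_get_rm_code r m → Spec_get_rm_code r m (get_rm_code r m)

-- ===== LEMMAS AND PROOFS =====

-- Proof-side reference function: the recursion with B's explicitly-shaped base / combine sets.
def pvRM (r : Int) (m : Int) : PySem.Set (List Char) :=
  if r = m then pvFull m
  else if r = 0 then pvZeroLit m
  else if m ≤ 0 then []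
  else pvCombine (pvRM r (m-1)) (pvRM (r-1) (m-1))
termination_by m.toNat
decreasing_by all_goals omega

-- generic list helpers ------------------------------------------------------

theorem pv_flatMap_eq_map {α β : Type} (l : List α) (h : α → List β) (h' : α → β)
    (he : ∀ x ∈ l, h x = [h' x]) : l.flatMap h = l.map h' := by
  induction l with
  | nil => rfl
  | cons x t ih =>
    simp only [List.flatMap_cons, List.map_cons, he x (by simp)]
    rw [ih (fun y hy => he y (by simp [hy]))]
    rfl

theorem pv_nested_add {α β : Type} [BEq α] (s1 : List β) (s2 : List β) (f : β → β → α)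
    (c : PySem.Set α) :
    s1.foldl (fun code i => s2.foldl (fun code j => PySem.Set.add code (f i j)) code) c
      = (s1.flatMap (fun i => s2.map (f i))).foldl PySem.Set.add c := by
  induction s1 generalizing c with
  | nil => rfl
  | cons x t ih =>
    simp only [List.foldl_cons, List.flatMap_cons, List.foldl_append]
    rw [ih, List.foldl_map]

theorem pv_pow_toNat (k : Nat) : ((2:Int) ^ k).toNat = 2 ^ k := by
  have : ((2:Int) ^ k) = ((2 ^ k : Nat) : Int) := by push_cast; ring
  rw [this, Int.toNat_natCast]

-- digits of Nat.toDigits 2 --------------------------------------------------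

theorem pv_toDigitsCore_two_mem : ∀ (f n : Nat) (ds : List Char),
    (∀ c ∈ ds, c = '0' ∨ c = '1') →
    ∀ c ∈ Nat.toDigitsCore 2 f n ds, c = '0' ∨ c = '1' := by
  intro f
  induction f with
  | zero => intro n ds h; simpa [Nat.toDigitsCore] using h
  | succ f ih =>
    intro n ds h c hc
    have hd : (n % 2).digitChar = '0' ∨ (n % 2).digitChar = '1' := by
      rcases Nat.mod_two_eq_zero_or_one n with h2 | h2 <;> simp [h2, Nat.digitChar]
    have hds : ∀ x ∈ (n % 2).digitChar :: ds, x = '0' ∨ x = '1' := by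
      intro x hx
      rcases List.mem_cons.mp hx with hx | hx
      · exact hx ▸ hd
      · exact h x hx
    simp only [Nat.toDigitsCore] at hc
    split at hc
    · exact hds c hc
    · exact ih (n / 2) _ hds c hc

theorem pv_toDigits_two_mem (n : Nat) : ∀ c ∈ Nat.toDigits 2 n, c = '0' ∨ c = '1' :=
  pv_toDigitsCore_two_mem (n+1) n [] (by simp)

theorem pv_toDigitsCore_ne_nil : ∀ (f n : Nat) (ds : List Char),
    ds ≠ [] → Nat.toDigitsCore 2 f n ds ≠ [] := by
  intro f
  induction f with
  | zero => intro n ds h; simpa [Nat.toDigitsCore] using h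
  | succ f ih =>
    intro n ds h
    simp only [Nat.toDigitsCore]
    split
    · simp
    · exact ih (n / 2) _ (by simp)

theorem pv_toDigits_two_ne_nil (n : Nat) : Nat.toDigits 2 n ≠ [] := by
  unfold Nat.toDigits
  simp only [Nat.toDigitsCore]
  split
  · simp
  · exact pv_toDigitsCore_ne_nil n (n / 2) _ (by simp)

-- joinNum lemmas ------------------------------------------------------------

theorem pv_joinNum_zeros (l : List Int) :
    pvJoinNum (l.map (fun _ => (0:Int))) = List.replicate l.length '0' := by
  unfold pvJoinNum
  rw [PySem.List.foldl_append_eq_flatMap]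
  simp only [List.nil_append, List.flatMap_map]
  rw [pv_flatMap_eq_map l _ (fun _ => '0') (by intro x hx; rfl)]
  simp [List.map_const']

theorem pv_joinNum_ones (l : List Int) :
    pvJoinNum (l.map (fun _ => (1:Int))) = List.replicate l.length '1' := by
  unfold pvJoinNum
  rw [PySem.List.foldl_append_eq_flatMap]
  simp only [List.nil_append, List.flatMap_map]
  rw [pv_flatMap_eq_map l _ (fun _ => '1') (by intro x hx; rfl)]
  simp [List.map_const']

-- force_length = zfill on "0b…" inputs --------------------------------------

theorem pv_forceLength_eq_zfill (i w : Int) (hi : 0 ≤ i) :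
    pvForceLength (PySem.Int.toBinChars0b i) w = PySem.Chars.zfill (PySem.Int.toBinChars i) w := by
  have hbin : PySem.Int.toBinChars0b i = '0' :: 'b' :: Nat.toDigits 2 i.toNat := by
    unfold PySem.Int.toBinChars0b; rw [if_neg (by omega)]
  have hbc : PySem.Int.toBinChars i = Nat.toDigits 2 i.toNat := by
    unfold PySem.Int.toBinChars; rw [if_neg (by omega)]
  obtain ⟨c, rest, hcr⟩ := List.exists_cons_of_ne_nil (pv_toDigits_two_ne_nil i.toNat)
  have hc : c = '0' ∨ c = '1' := pv_toDigits_two_mem i.toNat c (by rw [hcr]; simp)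
  have hdrop : PySem.List.slice ('0' :: 'b' :: (c :: rest)) (some 2) none = c :: rest := by
    simp [pysem]
  unfold pvForceLength
  rw [hbin, hbc, hcr, hdrop]
  by_cases hlt : (((c :: rest).length : Nat) : Int) < w
  · rw [if_pos hlt, pv_joinNum_zeros, PySem.List.length_pyRange_one]
    unfold PySem.Chars.zfill
    rw [if_neg (by omega)]
    dsimp only
    rw [if_neg (by rcases hc with h | h <;> simp [h])]
    have hnum : (w - ((c :: rest).length : Int) - 0).toNat = w.toNat - (c :: rest).length := by
      omega
    rw [hnum]
  · rw [if_neg hlt]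
    unfold PySem.Chars.zfill
    rw [if_pos (by omega)]

-- equal_case = full ----------------------------------------------------------

theorem pv_equalCase_eq_full (m : Int) : pvEqualCase m = pvFull m := by
  unfold pvEqualCase pvFull
  rw [show (fun (code : PySem.Set (List Char)) i =>
        PySem.Set.add code (pvForceLength (PySem.Int.toBinChars0b i) ((2:Int) ^ m.toNat)))
      = (fun (code : PySem.Set (List Char)) i => PySem.Set.add code
          ((fun i => pvForceLength (PySem.Int.toBinChars0b i) ((2:Int) ^ m.toNat)) i)) from rfl,
    ← List.foldl_map, ← PySem.Set.ofList_eq_foldl]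
  congr 1
  apply List.map_congr_left
  intro i hi
  exact pv_forceLength_eq_zfill i _ (PySem.List.mem_pyRange_one.mp hi).1

-- zero_case = zero literal ---------------------------------------------------

theorem pv_zeroCase_eq_lit (m : Int) : pvZeroCase m = pvZeroLit m := by
  unfold pvZeroCase pvZeroLit
  rw [pv_joinNum_zeros, pv_joinNum_ones, PySem.List.length_pyRange_one]
  norm_num

-- add_words on equal-length words -------------------------------------------

theorem pv_enumerate_map_zip (w2 : List Int) :
    ∀ (w1 : List Int) (k : Nat), w1.length + k ≤ w2.length →
    (PySem.List.enumerate w1 (k:Int)).map (fun p => PySem.Int.mod (p.2 + PySem.List.pyGetD w2 p.1 0) 2)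
      = (w1.zip (w2.drop k)).map (fun p => PySem.Int.mod (p.1 + p.2) 2) := by
  intro w1
  induction w1 with
  | nil => intro k _; simp [PySem.List.enumerate]
  | cons x t ih =>
    intro k hk
    have hklt : k < w2.length := by simp at hk; omega
    rw [List.drop_eq_getElem_cons hklt]
    simp only [PySem.List.enumerate_cons, List.map_cons, List.zip_cons_cons]
    have hget : PySem.List.pyGetD w2 ((k:Int)) 0 = w2[k] := by
      rw [PySem.List.pyGetD_natCast]; exact List.getD_eq_getElem w2 0 hklt
    have htail := ih (k+1) (by simp at hk ⊢; omega)
    push_cast at htail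
    rw [hget, htail, Int.add_comm]

theorem pv_addWords_zip (w1 w2 : List Int) (h : w1.length ≤ w2.length) :
    pvAddWords w1 w2 = (w1.zip w2).map (fun p => PySem.Int.mod (p.1 + p.2) 2) := by
  unfold pvAddWords
  rw [PySem.List.foldl_append_singleton_eq_map]
  simpa using pv_enumerate_map_zip w2 w1 0 (by omega)

-- the inner sum word is the character xor ------------------------------------

theorem pv_sum_eq_xor (a b : List Char) (hlen : a.length = b.length)
    (ha : ∀ c ∈ a, c = '0' ∨ c = '1') (hb : ∀ c ∈ b, c = '0' ∨ c = '1') :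
    pvJoinNum (pvAddWords (pvSplitNum a) (pvSplitNum b)) = pvXor a b := by
  rw [pv_addWords_zip _ _ (by simp [pvSplitNum, hlen])]
  unfold pvSplitNum pvXor
  rw [List.zip_map]
  unfold pvJoinNum
  rw [PySem.List.foldl_append_eq_flatMap]
  simp only [List.nil_append, List.flatMap_map]
  apply pv_flatMap_eq_map
  intro p hp
  obtain ⟨hpa, hpb⟩ := List.of_mem_zip hp
  rcases p with ⟨x, y⟩
  rcases ha x hpa with h1 | h1 <;> rcases hb y hpb with h2 | h2 <;> subst h1 <;> subst h2 <;> rfl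

-- zfill preserves the binary alphabet ----------------------------------------

theorem pv_zfill_mem (cs : List Char) (w : Int) (h : ∀ c ∈ cs, c = '0' ∨ c = '1') :
    ∀ c ∈ PySem.Chars.zfill cs w, c = '0' ∨ c = '1' := by
  intro c hc
  rcases cs with _ | ⟨c0, rest⟩
  · simp only [PySem.Chars.zfill] at hc
    split at hc
    · simp at hc
    · simp [List.eq_of_mem_replicate hc]
  · simp only [PySem.Chars.zfill] at hc
    split at hc
    · exact h c hc
    · split at hc
      · rcases List.mem_cons.mp hc with hc | hc
        · exact hc ▸ h c0 (by simp)
        · rcases List.mem_append.mp hc with hc | hc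
          · simp [List.eq_of_mem_replicate hc]
          · exact h c (by simp [hc])
      · rcases List.mem_append.mp hc with hc | hc
        · simp [List.eq_of_mem_replicate hc]
        · exact h c hc

-- invariant: every codeword of pvRM r m has length 2^m and is over {'0','1'} --

theorem pv_full_inv (m : Int) :
    ∀ s ∈ pvFull m, s.length = 2 ^ m.toNat ∧ ∀ c ∈ s, c = '0' ∨ c = '1' := by
  intro s hs
  unfold pvFull at hs
  rw [PySem.Set.mem_ofList] at hs
  obtain ⟨i, hi, rfl⟩ := List.mem_map.mp hs
  obtain ⟨hi0, hilt⟩ := PySem.List.mem_pyRange_one.mp hi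
  have hbc : PySem.Int.toBinChars i = Nat.toDigits 2 i.toNat := by
    unfold PySem.Int.toBinChars; rw [if_neg (by omega)]
  have hNlt : i.toNat < 2 ^ (2 ^ m.toNat) := by
    rw [pv_pow_toNat] at hilt
    have h' : ((2:Int) ^ (2 ^ m.toNat)) = ((2 ^ (2 ^ m.toNat) : Nat) : Int) := by push_cast; ring
    rw [h'] at hilt
    set N := 2 ^ (2 ^ m.toNat)
    omega
  have hdlen : (Nat.toDigits 2 i.toNat).length ≤ 2 ^ m.toNat :=
    Nat.toDigits_length 2 i.toNat (2 ^ m.toNat) (by positivity) hNlt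
  constructor
  · rw [PySem.Chars.length_zfill, hbc, pv_pow_toNat]
    omega
  · exact pv_zfill_mem _ _ (by rw [hbc]; exact pv_toDigits_two_mem i.toNat)

theorem pv_RM_inv : ∀ (n : Nat) (r m : Int), m.toNat = n → 0 ≤ r → r ≤ m →
    ∀ s ∈ pvRM r m, s.length = 2 ^ m.toNat ∧ ∀ c ∈ s, c = '0' ∨ c = '1' := by
  intro n
  induction n using Nat.strong_induction_on with
  | _ n ih =>
    intro r m hn hr hrm s hs
    rw [pvRM] at hs
    split at hs
    · exact pv_full_inv m s hs
    · split at hs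
      · rw [pvZeroLit, PySem.Set.mem_ofList] at hs
        simp only [List.mem_cons, List.not_mem_nil, or_false] at hs
        rcases hs with hs | hs
        · subst hs
          refine ⟨by rw [List.length_replicate, pv_pow_toNat], ?_⟩
          intro c hc; simp [List.eq_of_mem_replicate hc]
        · subst hs
          refine ⟨by rw [List.length_replicate, pv_pow_toNat], ?_⟩
          intro c hc; simp [List.eq_of_mem_replicate hc]
      · split at hs
        · simp at hs
        · rename_i hne hr0 hm0
          unfold pvCombine at hs
          rw [PySem.Set.mem_ofList] at hs
          rw [List.mem_flatMap] at hs
          obtain ⟨a, ha, hmem⟩ := hs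
          rw [List.mem_map] at hmem
          obtain ⟨b, hb, rfl⟩ := hmem
          have hmn : (m-1).toNat < n := by omega
          have hA := ih _ hmn r (m-1) rfl (by omega) (by omega) a ha
          have hB := ih _ hmn (r-1) (m-1) rfl (by omega) (by omega) b hb
          have hxlen : (pvXor a b).length = 2 ^ (m-1).toNat := by
            unfold pvXor
            rw [List.length_map, List.length_zip, hA.1, hB.1]
            omega
          constructor
          · rw [List.length_append, hA.1, hxlen]
            have hm1 : m.toNat = (m-1).toNat + 1 := by omega
            rw [hm1, pow_succ]
            omega
          · intro c hc
            rcases List.mem_append.mp hc with hc | hc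
            · exact hA.2 c hc
            · unfold pvXor at hc
              obtain ⟨p, _, rfl⟩ := List.mem_map.mp hc
              split <;> simp

-- A's recursion computes pvRM ------------------------------------------------

theorem pv_flatMap_congr_mem {α β : Type} (l : List α) (f g : α → List β)
    (h : ∀ x ∈ l, f x = g x) : l.flatMap f = l.flatMap g := by
  induction l with
  | nil => rfl
  | cons x t ih =>
    simp only [List.flatMap_cons, h x (by simp)]
    rw [ih (fun y hy => h y (by simp [hy]))]

theorem pv_A_eq_RM : ∀ (n : Nat) (r m : Int), m.toNat = n → 0 ≤ r → r ≤ m →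
    get_rm_codeChars r m = pvRM r m := by
  intro n
  induction n using Nat.strong_induction_on with
  | _ n ih =>
    intro r m hn hr hrm
    rw [get_rm_codeChars, pvRM]
    by_cases h1 : r = m
    · rw [if_pos h1, if_pos h1, pv_equalCase_eq_full]
    · rw [if_neg h1, if_neg h1]
      by_cases h2 : r = 0
      · rw [if_pos h2, if_pos h2, pv_zeroCase_eq_lit]
      · have hm : ¬ m ≤ 0 := by omega
        rw [if_neg h2, if_neg h2, if_neg hm, if_neg hm]
        show (get_rm_codeChars r (m-1)).foldl
            (fun code i => (get_rm_codeChars (r-1) (m-1)).foldl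
              (fun code j => PySem.Set.add code
                (i ++ pvJoinNum (pvAddWords (pvSplitNum i) (pvSplitNum j)))) code) []
          = pvCombine (pvRM r (m-1)) (pvRM (r-1) (m-1))
        have hmn : (m-1).toNat < n := by omega
        rw [ih _ hmn r (m-1) rfl (by omega) (by omega),
            ih _ hmn (r-1) (m-1) rfl (by omega) (by omega)]
        rw [pv_nested_add, ← PySem.Set.ofList_eq_foldl]
        unfold pvCombine
        congr 1
        apply pv_flatMap_congr_mem
        intro a ha
        apply List.map_congr_left
        intro b hb
        have hA := pv_RM_inv (m-1).toNat r (m-1) rfl (by omega) (by omega) a ha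
        have hB := pv_RM_inv (m-1).toNat (r-1) (m-1) rfl (by omega) (by omega) b hb
        rw [pv_sum_eq_xor a b (by rw [hA.1, hB.1]) hA.2 hB.2]

-- B's DP rows compute pvRM ---------------------------------------------------

theorem pv_step_eq (r : Int) (hr : 0 ≤ r) (n : Nat) :
    pvStep r ((PySem.List.pyRange 0 (min r (n:Int) + 1)).map (fun rr => pvRM rr (n:Int))) ((n:Int)+1)
      = (PySem.List.pyRange 0 (min r ((n:Int)+1) + 1)).map (fun rr => pvRM rr ((n:Int)+1)) := by
  unfold pvStep
  rw [PySem.List.foldl_append_singleton_eq_map, List.singleton_append]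
  rw [PySem.List.pyRange_one_cons (show (0:Int) < min r ((n:Int)+1) + 1 by omega), List.map_cons]
  rw [show (0:Int) + 1 = 1 from rfl]
  congr 1
  · conv_rhs => rw [pvRM]
    rw [if_neg (by omega), if_pos rfl]
  · apply List.map_congr_left
    intro rr hrr
    obtain ⟨hrr1, hrr2⟩ := PySem.List.mem_pyRange_one.mp hrr
    by_cases hre : rr = (n:Int) + 1
    · rw [if_pos hre, hre]
      conv_rhs => rw [pvRM]
      rw [if_pos rfl]
    · rw [if_neg hre]
      have hb1 : rr ≤ min r (n:Int) := by omega
      have h1 : rr = ((rr.toNat : Nat) : Int) := by omega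
      have h2 : min r (n:Int) + 1 = (((min r (n:Int)).toNat + 1 : Nat) : Int) := by omega
      have e1 : PySem.List.pyGetD
          ((PySem.List.pyRange 0 (min r (n:Int) + 1)).map (fun rr => pvRM rr (n:Int))) rr []
          = pvRM rr (n:Int) := by
        rw [h2, h1, PySem.List.pyGetD_map_pyRange _ _ _ _ (by omega), ← h1]
      have h1' : rr - 1 = (((rr - 1).toNat : Nat) : Int) := by omega
      have e2 : PySem.List.pyGetD
          ((PySem.List.pyRange 0 (min r (n:Int) + 1)).map (fun rr => pvRM rr (n:Int))) (rr - 1) []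
          = pvRM (rr - 1) (n:Int) := by
        rw [h2, h1', PySem.List.pyGetD_map_pyRange _ _ _ _ (by omega), ← h1']
      rw [e1, e2]
      conv_rhs => rw [pvRM]
      rw [if_neg hre, if_neg (by omega), if_neg (by omega)]
      norm_num

theorem pv_B_row (r : Int) (hr : 0 ≤ r) : ∀ (n : Nat),
    (PySem.List.pyRange 1 ((n:Int)+1)).foldl (pvStep r) [pvFull 0]
      = (PySem.List.pyRange 0 (min r (n:Int) + 1)).map (fun rr => pvRM rr (n:Int)) := by
  intro n
  induction n with
  | zero =>
    rw [show ((0:Nat):Int) + 1 = 1 from rfl, PySem.List.pyRange_one_eq_nil (by omega),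
        List.foldl_nil]
    rw [show min r ((0:Nat):Int) + 1 = 0 + 1 from by push_cast; omega]
    rw [PySem.List.pyRange_one_singleton, List.map_singleton]
    show [pvFull 0] = [pvRM 0 0]
    rw [pvRM, if_pos rfl]
  | succ n ihn =>
    have hc : (((n+1:Nat)):Int) + 1 = ((n:Int)+1) + 1 := by push_cast; ring
    rw [hc, PySem.List.pyRange_one_succ_right (by omega), List.foldl_append, ihn,
        List.foldl_cons, List.foldl_nil]
    have := pv_step_eq r hr n
    rw [this]
    norm_cast

-- ===== VERDICT (by name: the statement is the Claim_ definition above) =====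
theorem get_rm_code_spec : Claim_equal_get_rm_code := by
  intro r m _ hpre
  obtain ⟨hr, hrm⟩ := hpre
  unfold Spec_get_rm_code get_rm_code get_rm_code_alt
  rw [pv_A_eq_RM m.toNat r m rfl hr hrm]
  have hmn : m = ((m.toNat : Nat) : Int) := by omega
  have hrow : (PySem.List.pyRange 1 (m+1)).foldl (pvStep r) [pvFull 0]
      = (PySem.List.pyRange 0 (min r m + 1)).map (fun rr => pvRM rr m) := by
    have := pv_B_row r hr m.toNat
    rw [← hmn] at this
    exact this
  show (pvRM r m).map String.ofList
      = (PySem.List.pyGetD ((PySem.List.pyRange 1 (m+1)).foldl (pvStep r) [pvFull 0]) r []).map String.ofList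
  rw [hrow, min_eq_left hrm]
  have h1 : r = ((r.toNat : Nat) : Int) := by omega
  have h2 : r + 1 = ((r.toNat + 1 : Nat) : Int) := by omega
  rw [h2, h1, PySem.List.pyGetD_map_pyRange _ _ _ _ (by omega), ← h1]
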